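-- pv_equiv track=rewrite | github.com/feliciatrinh/coding-challenges-and-review | microsoft/min_deletions_to_obtain_string_in_format.py | min_deletions_naive
-- ===== SOURCE A (Python) =====
-- def min_deletions_naive(s):
--     """
--     Brute force method
--     Runtime: O(N * 2^N)?, Space: O(N)?
--     """
--     def is_valid(res):
--         """
--         Returns True if res is properly formatted and False otherwise.
--         Runtime: O(N), Space: O(1)
--         """
--         last_a = -1
--         first_b = len(res)
--         for i, char in enumerate(res):
--             if char == 'A':
--                 last_a = i
--             elif char == 'B' and first_b == len(res):
--                 first_b = i
--             if last_a > first_b: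
--                 return False
--         return True
--
--     def delete_letter(start, result, seen):
--         """
--         Returns the minimum number of letters that need to be deleted from s to achieve a properly formatted string.
--         """
--         if start >= len(s):
--             if result in seen:
--                 return len(s) - len(result)
--             if is_valid(result):
--                 seen.add(result)
--                 return len(s) - len(result)
--             return len(s)
--         return min(delete_letter(start + 1, result + s[start], seen), delete_letter(start + 1, result, seen))
--
--     if is_valid(s):
--         return 0
--     return delete_letter(0, '', set())
-- ===== SOURCE B (Python) =====
-- def min_deletions_naive(s):
--     """Linear DP: scan once; b_count = B's seen so far, deletions = min deletions
--     so the prefix scanned is all-A's-then-all-B's (other chars are always kept)."""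
--     b_count = 0
--     deletions = 0
--     for char in s:
--         if char == 'A':
--             deletions = min(deletions + 1, b_count)
--         elif char == 'B':
--             b_count += 1
--     return deletions
-- ===== Notes on version B (the rewrite author's own statement) =====
-- stated objective: faster
-- what changed: Replaced the exponential enumeration of all subsequences (recursive keep/delete branching with a memo set) by a single left-to-right DP pass keeping only a B-counter and a running minimum-deletion count.
import Mathlib
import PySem

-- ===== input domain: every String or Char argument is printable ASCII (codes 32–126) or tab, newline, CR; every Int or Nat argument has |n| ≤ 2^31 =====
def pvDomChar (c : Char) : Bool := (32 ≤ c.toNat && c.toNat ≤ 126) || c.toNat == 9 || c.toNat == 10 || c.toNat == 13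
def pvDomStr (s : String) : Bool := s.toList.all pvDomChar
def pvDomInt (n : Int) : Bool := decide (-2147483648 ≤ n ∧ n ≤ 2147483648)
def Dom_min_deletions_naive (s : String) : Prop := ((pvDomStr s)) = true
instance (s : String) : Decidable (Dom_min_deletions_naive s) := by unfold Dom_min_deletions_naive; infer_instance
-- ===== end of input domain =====

-- B replaces A's exponential keep/delete subsequence enumeration by a one-pass linear DP (objective: faster, asymptotic).
-- Python strings are carried as List Char (the sanctioned String ↔ List Char bridge).

-- ===== PORT A =====
-- the for-loop of is_valid with early return False; i is the enumerate index
def pvIsValidGo (n lastA firstB i : Int) : List Char → Bool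
  | [] => true
  | c :: t =>
    let lastA' := if c = 'A' then i else lastA
    let firstB' := if c = 'B' ∧ firstB = n then i else firstB
    if lastA' > firstB' then false else pvIsValidGo n lastA' firstB' (i + 1) t

def pvIsValid (res : List Char) : Bool :=
  pvIsValidGo res.length (-1) res.length 0 res

-- delete_letter; the mutated 'seen' set is threaded through in evaluation order
def pvDeleteLetter (s : List Char) (start : Nat) (result : List Char)
    (seen : PySem.Set (List Char)) : Int × PySem.Set (List Char) :=
  if h : start ≥ s.length then
    if PySem.Set.contains seen result then ((s.length : Int) - result.length, seen)
    else if pvIsValid result then ((s.length : Int) - result.length, PySem.Set.add seen result)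
    else ((s.length : Int), seen)
  else
    let c := s.getD start ' '   -- s[start]; in range because the guard failed (exact)
    let r1 := pvDeleteLetter s (start + 1) (result ++ [c]) seen
    let r2 := pvDeleteLetter s (start + 1) result r1.2
    (min r1.1 r2.1, r2.2)
termination_by s.length - start

def min_deletions_naive (s : String) : Int :=
  if pvIsValid s.toList then 0
  else (pvDeleteLetter s.toList 0 [] PySem.Set.empty).1

-- ===== PORT B =====
def min_deletions_naive_alt (s : String) : Int :=
  (s.toList.foldl
    (fun (st : Int × Int) c =>
      if c = 'A' then (st.1, min (st.2 + 1) st.1)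
      else if c = 'B' then (st.1 + 1, st.2)
      else st)
    (0, 0)).2

-- ===== PRECONDITION & SPEC =====
def Spec_min_deletions_naive (s : String) (out : Int) : Prop := out = min_deletions_naive_alt s
instance (s : String) (out : Int) : Decidable (Spec_min_deletions_naive s out) := by unfold Spec_min_deletions_naive; infer_instance

-- ===== CLAIM (what is proved, stated in full; the proofs are below) =====
def Claim_equal_min_deletions_naive : Prop := ∀ (s : String), Dom_min_deletions_naive s → Spec_min_deletions_naive s (min_deletions_naive s)

-- ===== LEMMAS AND PROOFS =====

-- specification-side validity: no 'A' after a 'B' (sb = a 'B' has been seen)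
def pvVGo (sb : Bool) : List Char → Bool
  | [] => true
  | c :: t => if c = 'A' ∧ sb then false else pvVGo (sb || (c = 'B')) t

-- the DP value: minimal deletions for t given b prior B's kept
def pvG (b : Nat) : List Char → Nat
  | [] => b
  | c :: t =>
    if c = 'A' then pvG b t
    else if c = 'B' then min (b + t.count 'A') (pvG (b + 1) t)
    else pvG b t

lemma pvIsValidGo_eq (l : List Char) : ∀ (n lastA firstB i : Int),
    lastA < i → lastA ≤ firstB → (firstB = n ∨ firstB < i) → i + l.length = n →
    pvIsValidGo n lastA firstB i l = pvVGo (decide (firstB ≠ n)) l := by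
  induction l with
  | nil => intros; simp [pvIsValidGo, pvVGo]
  | cons c t ih =>
    intro n lastA firstB i h1 h2 h3 h4
    simp only [List.length_cons] at h4
    push_cast at h4
    by_cases hA : c = 'A' <;> by_cases hB : c = 'B'
    · subst hA; exact absurd hB (by decide)
    · subst hA
      by_cases h3' : firstB = n
      · have hni : ¬ (n < (i : Int)) := by omega
        simp only [pvIsValidGo, pvVGo]
        simp [h3', hni]
        rw [ih n i n (i + 1) (by omega) (by omega) (by omega) (by omega)]
        simp [pvVGo]
      · have hgt : firstB < (i : Int) := by omega
        simp only [pvIsValidGo, pvVGo]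
        simp [h3', hgt]
    · subst hB
      by_cases h3' : firstB = n
      · have hng : ¬ ((i : Int) < lastA) := by omega
        simp only [pvIsValidGo, pvVGo]
        simp [h3', hng, hA]
        rw [ih n lastA i (i + 1) (by omega) (by omega) (by omega) (by omega)]
        have hin : i ≠ n := by omega
        simp [hin]
      · have hng : ¬ (firstB < lastA) := by omega
        simp only [pvIsValidGo, pvVGo]
        simp [h3', hng, hA]
        rw [ih n lastA firstB (i + 1) (by omega) (by omega) (by omega) (by omega)]
        simp [h3', decide_not]
    · have hng : ¬ (firstB < lastA) := by omega
      simp only [pvIsValidGo, pvVGo]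
      simp [hA, hB, hng]
      rw [ih n lastA firstB (i + 1) (by omega) (by omega) (by omega) (by omega)]
      simp [decide_not]

lemma pvIsValid_eq (l : List Char) : pvIsValid l = pvVGo false l := by
  have := pvIsValidGo_eq l l.length (-1) l.length 0 (by omega) (by omega) (by left; rfl) (by omega)
  simpa [pvIsValid] using this

lemma pvVGo_append (r : List Char) : ∀ (sb : Bool) (t : List Char),
    pvVGo sb (r ++ t) = if pvVGo sb r then pvVGo (sb || decide ('B' ∈ r)) t else false := by
  induction r with
  | nil => intro sb t; simp [pvVGo]
  | cons c r ih =>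
    intro sb t
    by_cases h : c = 'A' ∧ sb = true
    · simp [pvVGo, h]
    · have hmem : (decide ('B' ∈ c :: r)) = (decide (c = 'B') || decide ('B' ∈ r)) := by
        by_cases hc : c = 'B' <;> simp [hc, List.mem_cons, eq_comm]
    -- unfold one step on both sides and use the IH
      simp only [List.cons_append, pvVGo, if_neg h, hmem, ih]
      cases sb <;> by_cases hc : c = 'B' <;> simp [hc, Bool.or_assoc]

lemma pvG_le (t : List Char) : ∀ b, pvG b t ≤ b + t.count 'A' := by
  induction t with
  | nil => intro b; simp [pvG]
  | cons c t ih =>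
    intro b
    by_cases hA : c = 'A'
    · have h1 := ih b
      simp [pvG, hA, List.count_cons]
      try omega
    · by_cases hB : c = 'B'
      · simp [pvG, hA, hB, List.count_cons]
        try omega
      · have h1 := ih b
        simp [pvG, hA, hB, List.count_cons]
        try omega

lemma pvG_succ (t : List Char) : ∀ b, pvG (b + 1) t = pvG b t + 1 := by
  induction t with
  | nil => intro b; simp [pvG]
  | cons c t ih =>
    intro b
    by_cases hA : c = 'A'
    · simp [pvG, hA, ih]
    · by_cases hB : c = 'B'
      · simp [pvG, hA, hB, ih]
        try omega
      · simp [pvG, hA, hB, ih]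

lemma pvVGo_true_countA (t : List Char) : pvVGo true t = true → t.count 'A' = 0 := by
  induction t with
  | nil => simp
  | cons c t ih =>
    intro h
    by_cases hA : c = 'A'
    · simp [pvVGo, hA] at h
    · have h' : pvVGo true t = true := by simpa [pvVGo, hA] using h
      simp [List.count_cons, hA, ih h']

lemma pvG_ge (t : List Char) : ∀ b, b ≤ pvG b t := by
  induction t with
  | nil => intro b; simp [pvG]
  | cons c t ih =>
    intro b
    by_cases hA : c = 'A'
    · simpa [pvG, hA] using ih b
    · by_cases hB : c = 'B'
      · have h1 := ih (b + 1)
        simp [pvG, hA, hB]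
        omega
      · simpa [pvG, hA, hB] using ih b

lemma pvVGo_false_G (t : List Char) : pvVGo false t = true → ∀ b, pvG b t = b := by
  induction t with
  | nil => intros; simp [pvG]
  | cons c t ih =>
    intro h b
    by_cases hA : c = 'A'
    · have h' : pvVGo false t = true := by simpa [pvVGo, hA] using h
      simp [pvG, hA, ih h' b]
    · by_cases hB : c = 'B'
      · have h' : pvVGo true t = true := by simpa [pvVGo, hA, hB] using h
        have hc := pvVGo_true_countA t h'
        have hge := pvG_ge t (b + 1)
        simp [pvG, hA, hB, hc]
        omega
      · have h' : pvVGo false t = true := by simpa [pvVGo, hA, hB] using h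
        simp [pvG, hA, hB, ih h' b]

-- invariant / value lemma for A's recursion: on every call whose seen-set holds only
-- valid strings, the returned value is determined by (validity, has-B) of result
lemma pvDeleteLetter_val (s : List Char) : ∀ (fuel start : Nat), s.length - start = fuel →
    ∀ (result : List Char) (seen : PySem.Set (List Char)),
    (∀ r ∈ seen, pvVGo false r = true) →
    ((pvDeleteLetter s start result seen).1 =
      (if pvVGo false result = true then
        (s.length : Int) - result.length - ((s.drop start).length : Int) +
          (if 'B' ∈ result then ((s.drop start).count 'A' : Int)
           else (pvG 0 (s.drop start) : Int))
       else (s.length : Int)))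
    ∧ (∀ r ∈ (pvDeleteLetter s start result seen).2, pvVGo false r = true) := by
  intro fuel
  induction fuel with
  | zero =>
    intro start hf result seen hseen
    have hge : start ≥ s.length := by omega
    have hdrop : s.drop start = [] := List.drop_eq_nil_of_le hge
    rw [pvDeleteLetter, dif_pos hge]
    by_cases hmem : PySem.Set.contains seen result = true
    · have hval : pvVGo false result = true := hseen result (by
        simpa using (PySem.Set.contains_iff seen result).mp hmem)
      rw [if_pos hmem]
      refine ⟨?_, hseen⟩
      rw [hval, if_pos rfl, hdrop]
      simp [pvG] <;> split <;> omega
    · rw [if_neg hmem]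
      by_cases hval : pvIsValid result = true
      · have hv : pvVGo false result = true := by rw [← pvIsValid_eq]; exact hval
        rw [if_pos hval]
        refine ⟨?_, ?_⟩
        · rw [hv, if_pos rfl, hdrop]
          simp [pvG] <;> split <;> omega
        · intro r hr
          rcases (PySem.Set.mem_add seen result r).mp hr with h | h
          · exact hseen r h
          · rw [h]; exact hv
      · have hv : pvVGo false result = false := by
          rw [← pvIsValid_eq]; simpa using hval
        rw [if_neg hval]
        refine ⟨?_, hseen⟩
        rw [hv]
        simp
  | succ fuel ih =>
    intro start hf result seen hseen
    have hlt : start < s.length := by omega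
    have hnge : ¬ (start ≥ s.length) := by omega
    have hfuel : s.length - (start + 1) = fuel := by omega
    rw [pvDeleteLetter, dif_neg hnge]
    have hget : s.getD start ' ' = s[start] := List.getD_eq_getElem s ' ' hlt
    have hdrop : s.drop start = s[start] :: s.drop (start + 1) := List.drop_eq_getElem_cons hlt
    obtain ⟨hv1, hs1⟩ := ih (start + 1) hfuel (result ++ [s.getD start ' ']) seen hseen
    obtain ⟨hv2, hs2⟩ := ih (start + 1) hfuel result _ hs1
    refine ⟨?_, ?_⟩
    · show min (pvDeleteLetter s (start + 1) (result ++ [s.getD start ' ']) seen).1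
            (pvDeleteLetter s (start + 1) result
              (pvDeleteLetter s (start + 1) (result ++ [s.getD start ' ']) seen).2).1 = _
      rw [hv1, hv2, hdrop, ← hget]
      set c := s.getD start ' ' with hc
      set t := s.drop (start + 1) with ht
      have happ := pvVGo_append result false [c]
      have hlen : ((result ++ [c]).length : Int) = (result.length : Int) + 1 := by
        rw [List.length_append, List.length_singleton]
        push_cast
        ring
      have hcle := List.count_le_length (l := t) (a := 'A')
      have hGle := pvG_le t 0
      by_cases hvr : pvVGo false result = true
      · rw [hvr, if_pos rfl] at happ
        by_cases hBr : 'B' ∈ result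
        · rw [show (false || decide ('B' ∈ result)) = true by simp [hBr]] at happ
          by_cases hA : c = 'A'
          · have hvc : pvVGo false (result ++ [c]) = false := by
              rw [happ]; simp [pvVGo, hA]
            have hcnt : (c :: t).count 'A' = t.count 'A' + 1 := by
              simp [List.count_cons, hA]
            rw [hvc, hvr, hcnt]
            simp only [Bool.false_eq_true, if_false, if_pos rfl, if_pos hBr,
              List.length_cons]
            push_cast
            omega
          · have hvc : pvVGo false (result ++ [c]) = true := by
              rw [happ]; simp [pvVGo, hA]
            have hBc : 'B' ∈ result ++ [c] := by simp [hBr]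
            have hcnt : (c :: t).count 'A' = t.count 'A' := by
              simp [List.count_cons, hA]
            rw [hvc, hvr, hcnt]
            simp only [if_pos rfl, if_pos hBc, if_pos hBr, hlen, List.length_cons]
            push_cast
            omega
        · rw [show (false || decide ('B' ∈ result)) = false by simp [hBr]] at happ
          have hvc : pvVGo false (result ++ [c]) = true := by
            rw [happ]; simp [pvVGo]
          by_cases hA : c = 'A'
          · have hBc : ¬ ('B' ∈ result ++ [c]) := by simp [hBr, hA]
            have hG : pvG 0 (c :: t) = pvG 0 t := by simp [pvG, hA]
            rw [hvc, hvr, hG]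
            simp only [if_pos rfl, if_neg hBc, if_neg hBr, hlen, List.length_cons]
            push_cast
            omega
          · by_cases hB : c = 'B'
            · have hBc : 'B' ∈ result ++ [c] := by simp [hB]
              have hG : pvG 0 (c :: t) = min (t.count 'A') (pvG 0 t + 1) := by
                simp [pvG, hA, hB, pvG_succ]
              have hcnt : (c :: t).count 'A' = t.count 'A' := by
                simp [List.count_cons, hA]
              rw [hvc, hvr, hG, hcnt]
              simp only [if_pos rfl, if_pos hBc, if_neg hBr, hlen, List.length_cons]
              push_cast
              omega
            · have hBc : ¬ ('B' ∈ result ++ [c]) := by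
                simp [hBr]
                exact fun h => hB h.symm
              have hG : pvG 0 (c :: t) = pvG 0 t := by simp [pvG, hA, hB]
              rw [hvc, hvr, hG]
              simp only [if_pos rfl, if_neg hBc, if_neg hBr, hlen, List.length_cons]
              push_cast
              omega
      · have hvr' : pvVGo false result = false := by simpa using hvr
        rw [hvr', if_neg (by simp)] at happ
        rw [happ, hvr']
        simp
    · exact hs2

lemma alt_foldl (t : List Char) : ∀ (b d : Nat), d ≤ b →
    (t.foldl
      (fun (st : Int × Int) c =>
        if c = 'A' then (st.1, min (st.2 + 1) st.1)
        else if c = 'B' then (st.1 + 1, st.2)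
        else st)
      ((b : Int), (d : Int))).2 = ((min (d + t.count 'A') (pvG b t) : Nat) : Int) := by
  induction t with
  | nil => intro b d hdb; simp [pvG]; omega
  | cons c t ih =>
    intro b d hdb
    simp only [List.foldl_cons]
    by_cases hA : c = 'A'
    · rw [if_pos hA]
      have hmin : (min ((d : Int) + 1) (b : Int)) = ((min (d + 1) b : Nat) : Int) := by
        push_cast; omega
      rw [hmin, ih b (min (d + 1) b) (by omega)]
      have hG := pvG_le t b
      have hg : pvG b (c :: t) = pvG b t := by simp [pvG, hA]
      have hcnt : (c :: t).count 'A' = t.count 'A' + 1 := by simp [List.count_cons, hA]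
      rw [hg, hcnt]
      congr 1
      omega
    · by_cases hB : c = 'B'
      · rw [if_neg hA, if_pos hB]
        have hone : ((b : Int) + 1) = ((b + 1 : Nat) : Int) := by push_cast; ring
        rw [hone, ih (b + 1) d (by omega)]
        have hg : pvG b (c :: t) = min (b + t.count 'A') (pvG (b + 1) t) := by
          simp [pvG, hA, hB]
        have hcnt : (c :: t).count 'A' = t.count 'A' := by simp [List.count_cons, hA]
        rw [hg, hcnt]
        congr 1
        omega
      · rw [if_neg hA, if_neg hB]
        rw [ih b d hdb]
        have hg : pvG b (c :: t) = pvG b t := by simp [pvG, hA, hB]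
        have hcnt : (c :: t).count 'A' = t.count 'A' := by simp [List.count_cons, hA]
        rw [hg, hcnt]

lemma alt_eq_G (s : String) : min_deletions_naive_alt s = (pvG 0 s.toList : Int) := by
  unfold min_deletions_naive_alt
  have h0 : ((0 : Nat) : Int) = (0 : Int) := rfl
  rw [show ((0 : Int), (0 : Int)) = (((0 : Nat) : Int), ((0 : Nat) : Int)) from rfl]
  rw [alt_foldl s.toList 0 0 (le_refl 0)]
  have := pvG_le s.toList 0
  congr 1
  omega

-- ===== VERDICT (by name: the statement is the Claim_ definition above) =====
theorem min_deletions_naive_spec : Claim_equal_min_deletions_naive := by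
  intro s _
  unfold Spec_min_deletions_naive
  rw [alt_eq_G]
  unfold min_deletions_naive
  by_cases hv : pvIsValid s.toList
  · have : pvVGo false s.toList = true := by rw [← pvIsValid_eq]; exact hv
    rw [if_pos hv, pvVGo_false_G s.toList this 0]
    simp
  · rw [if_neg hv]
    obtain ⟨hval, -⟩ := pvDeleteLetter_val s.toList (s.toList.length) 0 (by omega) []
      PySem.Set.empty (by intro r hr; simp [PySem.Set.empty] at hr)
    rw [hval]
    have hvf : pvVGo false ([] : List Char) = true := by simp [pvVGo]
    simp [hvf]
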